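-- pv_equiv track=rewrite | github.com/thevitorhideki/academia-python | dicts/hard/define_vencedores.py | define_vencedores
-- ===== SOURCE A (Python) =====
-- def define_vencedores(numbers: list, players: dict):
--     player = {name: 0 for name in players}
--     winner = []
--
--     for name, player_num in players.items():
--         player[name] = sum(1 for num in numbers if num in player_num)
--
--     more_points = max(player.values())
--     winner = [name for name, points in player.items() if points == more_points]
--
--     return winner
-- ===== SOURCE B (Python) =====
-- def define_vencedores(numbers: list, players: dict):
--     # frequency table of the numbers, built once
--     cnt = {}
--     for num in numbers:
--         cnt[num] = cnt.get(num, 0) + 1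
--
--     # one pass over players: score via the frequency table, track best and winners
--     best = None
--     winners = []
--     for name, player_num in players.items():
--         pts = sum(c for v, c in cnt.items() if v in player_num)
--         if best is None or pts > best:
--             best = pts
--             winners = [name]
--         elif pts == best:
--             winners.append(name)
--
--     return winners
-- ===== Notes on version B (the rewrite author's own statement) =====
-- stated objective: alternative
-- what changed: B first builds a frequency table of numbers and scores each player by summing multiplicities over distinct values, tracking the running maximum and winner list in a single pass over players instead of A's per-player rescan of the full list followed by max() and a filtering pass; Pre_ excludes empty players (A's max() raises ValueError there, B naturally returns []) and duplicate player names (impossible for a Python dict argument).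
import Mathlib
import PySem

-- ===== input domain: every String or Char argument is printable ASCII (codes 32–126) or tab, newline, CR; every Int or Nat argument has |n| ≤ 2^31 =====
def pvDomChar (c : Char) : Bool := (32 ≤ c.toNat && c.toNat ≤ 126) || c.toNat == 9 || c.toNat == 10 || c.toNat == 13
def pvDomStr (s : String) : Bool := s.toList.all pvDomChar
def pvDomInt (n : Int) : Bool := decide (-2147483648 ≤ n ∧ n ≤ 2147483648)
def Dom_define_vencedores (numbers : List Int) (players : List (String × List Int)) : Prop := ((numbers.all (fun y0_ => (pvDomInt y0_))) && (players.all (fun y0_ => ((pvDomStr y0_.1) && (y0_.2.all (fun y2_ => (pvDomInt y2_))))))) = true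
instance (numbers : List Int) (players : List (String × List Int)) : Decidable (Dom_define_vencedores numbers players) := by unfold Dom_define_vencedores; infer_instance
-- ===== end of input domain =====

-- B replaces A's per-player rescan of `numbers` by a frequency table built once plus a
-- single pass over players that tracks the running maximum and the winner list (alternative shape, not claimed faster).

-- ===== PORT A =====
def define_vencedores (numbers : List Int) (players : List (String × List Int)) : List String :=
  -- player = {name: 0 for name in players}
  let player : PySem.Dict String Int :=
    players.foldl (fun d p => d.insert p.1 0) PySem.Dict.empty
  -- for name, player_num in players.items(): player[name] = sum(1 for num in numbers if num in player_num)
  let player :=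
    players.foldl
      (fun d p => d.insert p.1 (numbers.foldl (fun acc num => if num ∈ p.2 then acc + 1 else acc) 0))
      player
  -- more_points = max(player.values()); winner = [name for name, points ... if points == more_points]
  match PySem.List.max? player.values (fun v => v) with
  | some m => (player.items.filter (fun q => q.2 == m)).map (fun q => q.1)
  | none => []    -- unreachable under Pre_ (Python raises ValueError)

-- ===== PORT B =====
def define_vencedores_alt (numbers : List Int) (players : List (String × List Int)) : List String :=
  -- cnt[num] = cnt.get(num, 0) + 1
  let cnt : PySem.Dict Int Int :=
    numbers.foldl (fun d n => d.insert n (d.getD n 0 + 1)) PySem.Dict.empty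
  -- single pass over players: best (None initially) / winners
  let st :=
    players.foldl
      (fun (st : Option Int × List String) p =>
        let pts := cnt.items.foldl (fun acc vc => if vc.1 ∈ p.2 then acc + vc.2 else acc) 0
        match st.1 with
        | none => (some pts, [p.1])
        | some b =>
          if b < pts then (some pts, [p.1])
          else if pts = b then (st.1, st.2 ++ [p.1])
          else st)
      (none, [])
  st.2

-- ===== PRECONDITION & SPEC =====
-- Pre_ excludes empty `players` (A's max() raises ValueError there) and
-- association lists with duplicate player names, which cannot occur in a Python dict argument.
def Pre_define_vencedores (_numbers : List Int) (players : List (String × List Int)) : Prop :=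
  players ≠ [] ∧ (players.map (fun p => p.1)).Nodup
instance (numbers : List Int) (players : List (String × List Int)) : Decidable (Pre_define_vencedores numbers players) := by unfold Pre_define_vencedores; infer_instance

def pvWitness_define_vencedores : List Int × (List (String × List Int)) :=
  ([1, 2, 2, 3], [("ana", [2, 3]), ("bob", [1])])

def Spec_define_vencedores (numbers : List Int) (players : List (String × List Int)) (out : List String) : Prop := out = define_vencedores_alt numbers players
instance (numbers : List Int) (players : List (String × List Int)) (out : List String) : Decidable (Spec_define_vencedores numbers players out) := by unfold Spec_define_vencedores; infer_instance

-- ===== CLAIM (what is proved, stated in full; the proofs are below) =====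
def Claim_equal_define_vencedores : Prop := ∀ (numbers : List Int) (players : List (String × List Int)), Dom_define_vencedores numbers players → Pre_define_vencedores numbers players → Spec_define_vencedores numbers players (define_vencedores numbers players)

-- ===== LEMMAS AND PROOFS =====

-- per-player score as A computes it (literal inner loop of A's port)
def pvCntf (numbers ns : List Int) : Int :=
  numbers.foldl (fun acc num => if num ∈ ns then acc + 1 else acc) 0

-- B's loop body, abstracted over an already-computed score
def pvStepB (st : Option Int × List String) (q : String × Int) : Option Int × List String :=
  match st.1 with
  | none => (some q.2, [q.1])
  | some b =>
    if b < q.2 then (some q.2, [q.1])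
    else if q.2 = b then (st.1, st.2 ++ [q.1])
    else st

theorem pv_sum_map_add {a : Type} (l : List a) (f g : a -> Int) :
    (l.map (fun x => f x + g x)).sum = (l.map f).sum + (l.map g).sum := by
  induction l with
  | nil => simp
  | cons x t ih => simp [ih]; ring

theorem pv_sum_indicator_zero (u : List Int) (x : Int) (h : x ∉ u) :
    (u.map (fun k => if k == x then (1 : Int) else 0)).sum = 0 := by
  induction u with
  | nil => simp
  | cons y t ih =>
    simp only [List.mem_cons, not_or] at h
    rw [List.map_cons, List.sum_cons, ih h.2]
    rw [if_neg (by simp [beq_iff_eq]; exact Ne.symm h.1)]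
    ring

theorem pv_sum_indicator (u : List Int) (x : Int) (h : u.Nodup) :
    (u.map (fun k => if k == x then (1 : Int) else 0)).sum = if x ∈ u then 1 else 0 := by
  induction u with
  | nil => simp
  | cons y t ih =>
    rcases List.nodup_cons.mp h with ⟨hy, ht⟩
    rw [List.map_cons, List.sum_cons]
    by_cases hyx : y = x
    · subst hyx
      rw [pv_sum_indicator_zero t y hy]
      simp
    · rw [if_neg (by simp [beq_iff_eq]; exact hyx), ih ht]
      simp [Ne.symm hyx]

theorem pv_count_sum (l : List Int) (s : List Int) (p : Int -> Bool)
    (hs : s.Nodup) (hsub : ∀ x ∈ l, x ∈ s) :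
    ((s.filter p).map (fun k => ((l.count k : Nat) : Int))).sum = ((l.countP p : Nat) : Int) := by
  induction l with
  | nil => simp
  | cons x t ih =>
    have ht : ∀ y ∈ t, y ∈ s := fun y hy => hsub y (List.mem_cons_of_mem _ hy)
    have hx : x ∈ s := hsub x (List.mem_cons_self)
    have hcnt : ∀ k : Int, (((x :: t).count k : Nat) : Int)
        = ((t.count k : Nat) : Int) + (if k == x then (1 : Int) else 0) := by
      intro k
      by_cases hkx : k = x
      · subst hkx; simp
      · simp [hkx, beq_iff_eq, Ne.symm hkx]
    calc ((s.filter p).map (fun k => (((x :: t).count k : Nat) : Int))).sum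
        = ((s.filter p).map (fun k => ((t.count k : Nat) : Int) + (if k == x then (1:Int) else 0))).sum := by
          exact congrArg List.sum (List.map_congr_left (fun k _ => hcnt k))
      _ = ((s.filter p).map (fun k => ((t.count k : Nat) : Int))).sum
            + ((s.filter p).map (fun k => if k == x then (1:Int) else 0)).sum := by
          exact pv_sum_map_add _ _ _
      _ = ((t.countP p : Nat) : Int) + (if x ∈ s.filter p then 1 else 0) := by
          rw [ih ht, pv_sum_indicator _ _ (hs.filter p)]
      _ = (((x :: t).countP p : Nat) : Int) := by
          rw [List.countP_cons]
          by_cases hpx : p x = true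
          · simp [List.mem_filter, hx, hpx]
          · simp [List.mem_filter, hpx]

theorem pv_foldl_if_add {a : Type} (l : List a) (p : a -> Prop) [DecidablePred p] (g : a -> Int) :
    ∀ i : Int, l.foldl (fun acc x => if p x then acc + g x else acc) i
      = i + ((l.filter (fun x => decide (p x))).map g).sum := by
  induction l with
  | nil => intro i; simp
  | cons x t ih =>
    intro i
    by_cases hp : p x
    · simp [List.foldl_cons, hp, ih (i + g x)]; ring
    · simp [List.foldl_cons, hp, ih i]

theorem pv_sum_ones {a : Type} (l : List a) :
    (l.map (fun _ => (1 : Int))).sum = (l.length : Int) := by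
  induction l with
  | nil => simp
  | cons y t ih => simp; ring

theorem pv_cntf_eq_countP (numbers ns : List Int) :
    pvCntf numbers ns = ((numbers.countP (fun x => decide (x ∈ ns)) : Nat) : Int) := by
  unfold pvCntf
  rw [pv_foldl_if_add numbers (fun x => x ∈ ns) (fun _ => (1 : Int)) 0]
  rw [List.countP_eq_length_filter]
  rw [pv_sum_ones]
  ring

-- B's per-player sum over the frequency table equals A's per-player rescan
theorem pv_ptsB (numbers ns : List Int) :
    ((numbers.foldl (fun d n => d.insert n (d.getD n 0 + 1)) PySem.Dict.empty).items.foldl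
        (fun acc vc => if vc.1 ∈ ns then acc + vc.2 else acc) 0)
      = pvCntf numbers ns := by
  rw [PySem.Dict.foldl_insert_getD_add_one_eq_counter, PySem.Dict.items_counter]
  rw [List.foldl_map]
  rw [pv_foldl_if_add (PySem.Set.ofList numbers) (fun k => k ∈ ns) (fun k => ((numbers.count k : Nat) : Int)) 0]
  rw [pv_count_sum numbers (PySem.Set.ofList numbers) _
      (PySem.Set.nodup_ofList numbers)
      (fun x hx => (PySem.Set.mem_ofList numbers x).mpr hx)]
  rw [pv_cntf_eq_countP]
  simp

-- overwriting pass of A's dict loop, generalized over a processed prefix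
theorem pv_phase2 (f : String × List Int -> Int) :
    ∀ (rest done : List (String × List Int)),
      ((done.map (fun p => p.1)) ++ (rest.map (fun p => p.1))).Nodup →
      rest.foldl (fun d p => d.insert p.1 (f p))
        (PySem.Dict.mk (done.map (fun p => (p.1, f p)) ++ rest.map (fun p => (p.1, (0 : Int)))))
      = PySem.Dict.mk (done.map (fun p => (p.1, f p)) ++ rest.map (fun p => (p.1, f p))) := by
  intro rest
  induction rest with
  | nil => intro done _; simp
  | cons hd t ih =>
    intro done hnd
    rw [List.map_cons] at hnd
    obtain ⟨nd1, nd2, disj⟩ := List.nodup_append.mp hnd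
    have hhd_done : ∀ q ∈ done, q.1 ≠ hd.1 := by
      intro q hq he
      have h1 : q.1 ∈ done.map (fun p => p.1) := List.mem_map.mpr ⟨q, hq, rfl⟩
      exact disj _ h1 _ (by simp) he
    have hhd_t : ∀ q ∈ t, q.1 ≠ hd.1 := by
      intro q hq he
      rcases List.nodup_cons.mp nd2 with ⟨hnotin, _⟩
      exact hnotin (List.mem_map.mpr ⟨q, hq, he⟩)
    have hcont : (PySem.Dict.mk (done.map (fun p => (p.1, f p)) ++ (hd :: t).map (fun p => (p.1, (0:Int))))).contains hd.1 = true := by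
      rw [PySem.Dict.contains_mk]
      simp [List.any_append]
    have hitems := PySem.Dict.items_insert_of_contains
      (PySem.Dict.mk (done.map (fun p => (p.1, f p)) ++ (hd :: t).map (fun p => (p.1, (0:Int))))) (f hd) hcont
    have hmap : (done.map (fun p => (p.1, f p)) ++ (hd :: t).map (fun p => (p.1, (0:Int)))).map
          (fun p => if (p.1 == hd.1) = true then (hd.1, f hd) else p)
        = (done ++ [hd]).map (fun p => (p.1, f p)) ++ t.map (fun p => (p.1, (0:Int))) := by
      rw [List.map_append, List.map_cons, List.map_cons]
      have h1 : (done.map (fun p => (p.1, f p))).map (fun p => if (p.1 == hd.1) = true then (hd.1, f hd) else p)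
          = done.map (fun p => (p.1, f p)) := by
        rw [List.map_map]
        apply List.map_congr_left
        intro q hq
        simp [beq_iff_eq, hhd_done q hq]
      have h2 : (t.map (fun p => (p.1, (0:Int)))).map (fun p => if (p.1 == hd.1) = true then (hd.1, f hd) else p)
          = t.map (fun p => (p.1, (0:Int))) := by
        rw [List.map_map]
        apply List.map_congr_left
        intro q hq
        simp [beq_iff_eq, hhd_t q hq]
      simp only [h1, h2, beq_self_eq_true, if_pos]
      simp
    rw [List.foldl_cons]
    have hd1 : (PySem.Dict.mk (done.map (fun p => (p.1, f p)) ++ (hd :: t).map (fun p => (p.1, (0:Int))))).insert hd.1 (f hd)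
        = PySem.Dict.mk ((done ++ [hd]).map (fun p => (p.1, f p)) ++ t.map (fun p => (p.1, (0:Int)))) := by
      apply PySem.Dict.ext
      rw [hitems, hmap]
    rw [hd1]
    have hnd3 : (((done ++ [hd]).map (fun p => p.1)) ++ (t.map (fun p => p.1))).Nodup := by
      simpa [List.map_append, List.append_assoc] using hnd
    have := ih (done ++ [hd]) hnd3
    rw [this, List.map_append]
    simp [List.append_assoc]

-- A's two dict-building folds produce exactly the association list of scores
theorem pv_dictA (f : String × List Int -> Int) (players : List (String × List Int))
    (h : (players.map (fun p => p.1)).Nodup) :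
    players.foldl (fun d p => d.insert p.1 (f p))
      (players.foldl (fun d p => d.insert p.1 (0 : Int)) PySem.Dict.empty)
    = PySem.Dict.mk (players.map (fun p => (p.1, f p))) := by
  have h0 : players.foldl (fun d p => d.insert p.1 (0 : Int)) PySem.Dict.empty
      = PySem.Dict.mk (players.map (fun p => (p.1, (0:Int)))) := by
    apply PySem.Dict.ext
    have := PySem.Dict.items_foldl_insert_fresh players (fun p => p.1) (fun _ => (0:Int))
      PySem.Dict.empty (fun a _ => by simp [PySem.Dict.contains_empty]) h
    simpa [PySem.Dict.empty] using this
  rw [h0]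
  have := pv_phase2 f players [] (by simpa using h)
  simpa using this

-- single-pass max/winners fold equals "max then filter"
theorem pv_pass_inv (t : List (String × Int)) :
    ∀ (m : Int) (ws : List String),
      t.foldl pvStepB (some m, ws)
      = (some (t.foldl (fun a q => max a q.2) m),
         (if t.foldl (fun a q => max a q.2) m ≤ m then ws else [])
           ++ (t.filter (fun q => q.2 == t.foldl (fun a q => max a q.2) m)).map (fun q => q.1)) := by
  induction t with
  | nil => intro m ws; simp
  | cons q t ih =>
    intro m ws
    have hle : ∀ (a : Int), a ≤ t.foldl (fun x y => max x y.2) a := by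
      intro a
      have := (PySem.List.le_foldl_max (t.map (fun q => q.2)) a).1
      rwa [List.foldl_map] at this
    rw [List.foldl_cons]
    by_cases h1 : m < q.2
    · have hstep : pvStepB (some m, ws) q = (some q.2, [q.1]) := by
        simp [pvStepB, h1]
      rw [hstep, ih q.2 [q.1]]
      have hmax : max m q.2 = q.2 := max_eq_right (le_of_lt h1)
      have hM : (q :: t).foldl (fun a q => max a q.2) m = t.foldl (fun a q => max a q.2) q.2 := by
        simp [List.foldl_cons, hmax]
      rw [hM]
      have hMge : q.2 ≤ t.foldl (fun a q => max a q.2) q.2 := hle q.2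
      have hMgm : ¬ (t.foldl (fun a q => max a q.2) q.2 ≤ m) := by
        intro hc; omega
      rw [List.filter_cons]
      by_cases h2 : q.2 = t.foldl (fun a q => max a q.2) q.2
      · rw [if_pos (le_of_eq h2.symm), if_neg hMgm,
          if_pos (show (q.2 == t.foldl (fun a q => max a q.2) q.2) = true from beq_iff_eq.mpr h2)]
        simp
      · have hnle : ¬ (t.foldl (fun a q => max a q.2) q.2 ≤ q.2) := fun hc => h2 (le_antisymm hMge hc)
        rw [if_neg hnle, if_neg hMgm,
          if_neg (show ¬ ((q.2 == t.foldl (fun a q => max a q.2) q.2) = true) from by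
            simp only [beq_iff_eq]; exact h2)]
    · have hmax : max m q.2 = m := max_eq_left (not_lt.mp h1)
      have hM : (q :: t).foldl (fun a q => max a q.2) m = t.foldl (fun a q => max a q.2) m := by
        simp [List.foldl_cons, hmax]
      rw [hM]
      by_cases h2 : q.2 = m
      · have hstep : pvStepB (some m, ws) q = (some m, ws ++ [q.1]) := by
          simp [pvStepB, h2]
        rw [hstep, ih m (ws ++ [q.1])]
        rw [List.filter_cons]
        by_cases h3 : t.foldl (fun a q => max a q.2) m ≤ m
        · have hqM : (q.2 == t.foldl (fun a q => max a q.2) m) = true := by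
            have : t.foldl (fun a q => max a q.2) m = m := le_antisymm h3 (hle m)
            simp [h2, this]
          simp [h3, hqM]
        · have hqM : (q.2 == t.foldl (fun a q => max a q.2) m) = false := by
            have := hle m
            simp only [h2, beq_eq_false_iff_ne, ne_eq]
            omega
          simp [h3, hqM]
      · have hq2 : q.2 < m := lt_of_le_of_ne (not_lt.mp h1) h2
        have hstep : pvStepB (some m, ws) q = (some m, ws) := by
          simp [pvStepB, h1, h2]
        rw [hstep, ih m ws]
        rw [List.filter_cons]
        have hqM : (q.2 == t.foldl (fun a q => max a q.2) m) = false := by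
          have := hle m
          simp only [beq_eq_false_iff_ne, ne_eq]
          omega
        simp [hqM]

theorem pv_foldl_congr {a b : Type} (l : List a) (f g : b -> a -> b) (i : b)
    (h : ∀ st x, x ∈ l → f st x = g st x) : l.foldl f i = l.foldl g i := by
  induction l generalizing i with
  | nil => rfl
  | cons x t ih =>
    rw [List.foldl_cons, List.foldl_cons, h i x (List.mem_cons_self)]
    exact ih _ (fun st y hy => h st y (List.mem_cons_of_mem _ hy))

theorem pv_alt_eq (numbers : List Int) (players : List (String × List Int)) :
    define_vencedores_alt numbers players
      = ((players.map (fun p => (p.1, pvCntf numbers p.2))).foldl pvStepB (none, [])).2 := by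
  unfold define_vencedores_alt
  dsimp only
  rw [List.foldl_map]
  apply congrArg
  apply pv_foldl_congr
  intro st p _
  simp only [pv_ptsB numbers p.2]
  cases h : st.1 <;> simp [pvStepB, h]

theorem pv_a_eq (numbers : List Int) (players : List (String × List Int))
    (hnd : (players.map (fun p => p.1)).Nodup) :
    define_vencedores numbers players
      = (match PySem.List.max? ((players.map (fun p => (p.1, pvCntf numbers p.2))).map (fun q => q.2)) (fun v => v) with
        | some m => ((players.map (fun p => (p.1, pvCntf numbers p.2))).filter (fun q => q.2 == m)).map (fun q => q.1)
        | none => []) := by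
  unfold define_vencedores
  dsimp only
  have hA := pv_dictA (fun p => pvCntf numbers p.2) players hnd
  simp only [pvCntf] at hA
  rw [hA]
  rfl

-- ===== VERDICT (by name: the statement is the Claim_ definition above) =====
theorem define_vencedores_spec : Claim_equal_define_vencedores := by
  intro numbers players _hdom hpre
  obtain ⟨hne, hnd⟩ := hpre
  unfold Spec_define_vencedores
  rw [pv_a_eq numbers players hnd, pv_alt_eq numbers players]
  cases players with
  | nil => exact absurd rfl hne
  | cons hd tl =>
    rw [List.map_cons, List.map_cons, List.foldl_cons]
    set L := tl.map (fun p => (p.1, pvCntf numbers p.2)) with hL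
    set c := pvCntf numbers hd.2 with hc
    have hfirst : pvStepB (none, []) (hd.1, c) = (some c, [hd.1]) := rfl
    rw [hfirst, pv_pass_inv L c [hd.1]]
    rw [PySem.List.max?_id_cons]
    have hM2 : (L.map (fun q => q.2)).foldl max c = L.foldl (fun a q => max a q.2) c := by
      rw [List.foldl_map]
    rw [hM2]
    set M := L.foldl (fun a q => max a q.2) c with hMdef
    have hfle : c ≤ M := by
      have := (PySem.List.le_foldl_max (L.map (fun q => q.2)) c).1
      rwa [List.foldl_map] at this
    dsimp only
    rw [List.filter_cons]
    by_cases h2 : c = M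
    · rw [if_pos (beq_iff_eq.mpr h2), if_pos (le_of_eq h2.symm)]
      simp
    · rw [if_neg (show ¬ ((c == M) = true) from by simp only [beq_iff_eq]; exact h2),
        if_neg (show ¬ (M ≤ c) from fun hc2 => h2 (le_antisymm hfle hc2))]
      simp
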